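-- pv_equiv track=rewrite | github.com/NahuelMarek/HackerRankSolutions | ragnoli.py | poner_letras
-- ===== SOURCE A (Python) =====
-- def poner_letras(i,num_of_letras):
--     letter="abcdefghijklmnopqrstuvwxyz"
--     rag=""
--     for letra in range(num_of_letras,i,-1):
--         rag+=letter[letra]+"-"
--     rag_right = rag[::-1]
--     texto=rag+letter[i]+rag_right
--     texto=texto.center(num_of_letras*3+num_of_letras+1, "-")
--     return texto
-- ===== SOURCE B (Python) =====
-- def poner_letras(i, num_of_letras):
--     # Build the full mirrored index sequence directly, join once, then center.
--     letter = "abcdefghijklmnopqrstuvwxyz"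
--     seq = list(range(num_of_letras, i, -1)) + [i] + list(range(i + 1, num_of_letras + 1))
--     return "-".join(letter[x] for x in seq).center(num_of_letras * 3 + num_of_letras + 1, "-")
-- ===== Notes on version B (the rewrite author's own statement) =====
-- stated objective: simpler
-- what changed: B builds the whole mirrored sequence of letter indices directly and does one "-".join over it, instead of A's accumulate-half-with-trailing-dashes-then-string-reverse-and-concatenate construction.
import Mathlib
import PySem

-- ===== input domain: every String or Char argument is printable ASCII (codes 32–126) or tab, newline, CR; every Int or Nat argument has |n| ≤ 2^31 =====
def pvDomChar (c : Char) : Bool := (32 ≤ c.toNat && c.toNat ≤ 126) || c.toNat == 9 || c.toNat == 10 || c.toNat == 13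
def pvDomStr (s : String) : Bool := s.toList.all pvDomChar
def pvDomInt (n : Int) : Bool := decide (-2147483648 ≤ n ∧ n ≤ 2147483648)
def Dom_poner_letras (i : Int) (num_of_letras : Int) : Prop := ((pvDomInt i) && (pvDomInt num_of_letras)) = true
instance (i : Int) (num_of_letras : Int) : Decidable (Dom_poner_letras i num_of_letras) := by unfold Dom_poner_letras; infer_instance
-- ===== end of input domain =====

-- B replaces A's build-half-then-reverse construction by one direct mirrored sequence + join (objective: simpler).

-- shared hand-port of Python's str.center(w, f) (PySem has none): exact CPython rule
-- left margin = marg//2 + (marg & w & 1); here marg > 0 and w > 0, so the bit test is the two parities.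
def pyCenterChars (s : List Char) (w : Int) (f : Char) : List Char :=
  if w ≤ (s.length : Int) then s
  else
    let marg := w - (s.length : Int)
    let left := PySem.Int.floordiv marg 2 + (if marg % 2 = 1 ∧ w % 2 = 1 then 1 else 0)
    List.replicate left.toNat f ++ s ++ List.replicate (marg - left).toNat f

-- ===== PORT A =====
def poner_letras (i : Int) (num_of_letras : Int) : String :=
  let letter := "abcdefghijklmnopqrstuvwxyz".toList
  -- for letra in range(num_of_letras, i, -1): rag += letter[letra] + "-"
  let rag := (PySem.List.pyRange num_of_letras i (-1)).foldl
      (fun acc letra => acc ++ [PySem.List.pyGetD letter letra 'a', '-']) []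
  -- rag[::-1] ; exact: PySem.List.slice?_none_none_neg_one says step -1 full slice is reverse
  let rag_right := rag.reverse
  let texto := rag ++ [PySem.List.pyGetD letter i 'a'] ++ rag_right
  String.ofList (pyCenterChars texto (num_of_letras * 3 + num_of_letras + 1) '-')

-- ===== PORT B =====
def poner_letras_alt (i : Int) (num_of_letras : Int) : String :=
  let letter := "abcdefghijklmnopqrstuvwxyz".toList
  let seq := PySem.List.pyRange num_of_letras i (-1) ++ [i]
      ++ PySem.List.pyRange (i + 1) (num_of_letras + 1) 1
  let joined := PySem.Chars.join ['-'] (seq.map (fun x => [PySem.List.pyGetD letter x 'a']))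
  String.ofList (pyCenterChars joined (num_of_letras * 3 + num_of_letras + 1) '-')

-- ===== PRECONDITION & SPEC =====
-- Pre_ excludes exactly the inputs on which A raises IndexError: letter[i] needs -26 ≤ i ≤ 25,
-- and when the loop runs (num_of_letras > i) its largest index num_of_letras must be ≤ 25.
def Pre_poner_letras (i : Int) (num_of_letras : Int) : Prop :=
  -26 ≤ i ∧ i ≤ 25 ∧ (num_of_letras ≤ i ∨ num_of_letras ≤ 25)
instance (i : Int) (num_of_letras : Int) : Decidable (Pre_poner_letras i num_of_letras) := by
  unfold Pre_poner_letras; infer_instance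
def pvWitness_poner_letras : Int × Int := (1, 4)

def Spec_poner_letras (i : Int) (num_of_letras : Int) (out : String) : Prop :=
  out = poner_letras_alt i num_of_letras
instance (i : Int) (num_of_letras : Int) (out : String) : Decidable (Spec_poner_letras i num_of_letras out) := by
  unfold Spec_poner_letras; infer_instance

-- ===== CLAIM (what is proved, stated in full; the proofs are below) =====
def Claim_equal_poner_letras : Prop := ∀ (i : Int) (num_of_letras : Int),
  Dom_poner_letras i num_of_letras → Pre_poner_letras i num_of_letras →
  Spec_poner_letras i num_of_letras (poner_letras i num_of_letras)

-- ===== LEMMAS AND PROOFS =====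

-- join "-" over (c :: s) singletons = letter c followed by "-x" blocks
theorem join_cons_eq_flatMap (g : Int → Char) (s : List Int) (c : Int) :
    PySem.Chars.join ['-'] ((c :: s).map (fun x => [g x]))
      = [g c] ++ s.flatMap (fun x => ['-', g x]) := by
  induction s generalizing c with
  | nil => simp [PySem.Chars.join_singleton]
  | cons y t ih =>
      have h := ih y
      simp only [List.map_cons] at h ⊢
      rw [PySem.Chars.join_cons_cons, h]
      simp

-- join over a prefix r followed by a nonempty tail peels off "x-" blocks
theorem join_append_cons (g : Int → Char) (r : List Int) (c : Int) (s : List Int) :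
    PySem.Chars.join ['-'] ((r ++ c :: s).map (fun x => [g x]))
      = r.flatMap (fun x => [g x, '-'])
        ++ PySem.Chars.join ['-'] ((c :: s).map (fun x => [g x])) := by
  induction r with
  | nil => simp
  | cons x r' ih =>
      have h : ∃ y l, r' ++ c :: s = y :: l := by
        cases r' with
        | nil => exact ⟨c, s, rfl⟩
        | cons a b => exact ⟨a, b ++ c :: s, rfl⟩
      obtain ⟨y, l, hy⟩ := h
      rw [hy] at ih
      simp only [List.cons_append, List.map_cons, hy] at ih ⊢
      rw [PySem.Chars.join_cons_cons, ih]
      simp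

theorem mirror_eq_join (g : Int → Char) (r : List Int) (c : Int) :
    r.flatMap (fun x => [g x, '-']) ++ [g c] ++ (r.flatMap (fun x => [g x, '-'])).reverse
      = PySem.Chars.join ['-'] ((r ++ c :: r.reverse).map (fun x => [g x])) := by
  have hrev : ∀ t : List Int, (t.flatMap (fun x => [g x, '-'])).reverse
      = t.reverse.flatMap (fun x => ['-', g x]) := by
    intro t
    induction t with
    | nil => simp
    | cons x t ih => simp [ih]
  rw [join_append_cons, join_cons_eq_flatMap, hrev]
  simp

-- ===== VERDICT (by name: the statement is the Claim_ definition above) =====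
theorem poner_letras_spec : Claim_equal_poner_letras := by
  intro i n _ _
  unfold Spec_poner_letras poner_letras poner_letras_alt
  simp only []
  rw [PySem.List.foldl_append_eq_flatMap, List.nil_append,
    show PySem.List.pyRange (i + 1) (n + 1) 1 = (PySem.List.pyRange n i (-1)).reverse by
      rw [PySem.List.pyRange_neg_one_eq_reverse, List.reverse_reverse],
    show PySem.List.pyRange n i (-1) ++ [i] ++ (PySem.List.pyRange n i (-1)).reverse
        = PySem.List.pyRange n i (-1) ++ i :: (PySem.List.pyRange n i (-1)).reverse by simp,
    mirror_eq_join]
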